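-- pv_equiv track=rewrite | github.com/Stish/teams_chat_export | teams_utils.py | format_member_list_for_display
-- ===== SOURCE A (Python) =====
-- def format_member_list_for_display(full_members):
--     """
--     Format member list for display by replacing every second comma with semicolon.
--
--     Args:
--         full_members (str): Comma-separated list of member names.
--
--     Returns:
--         str: Formatted member list with semicolons for better readability.
--     """
--     if not full_members:
--         return ""
--
--     parts = full_members.split(', ')
--     new_members = []
--     for idx, part in enumerate(parts):
--         if idx > 0:
--             if idx % 2 == 0:
--                 new_members.append('; ' + part)
--             else:
--                 new_members.append(', ' + part)
--         else:
--             new_members.append(part)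
--
--     return ''.join(new_members)
-- ===== SOURCE B (Python) =====
-- def _pairs(parts):
--     if len(parts) <= 2:
--         return [', '.join(parts)]
--     return [', '.join(parts[:2])] + _pairs(parts[2:])
--
--
-- def format_member_list_for_display(full_members):
--     if not full_members:
--         return ""
--     return '; '.join(_pairs(full_members.split(', ')))
-- ===== Notes on version B (the rewrite author's own statement) =====
-- stated objective: simpler
-- what changed: A walks enumerate(parts) choosing a comma or semicolon prefix per index parity and concatenates; B recursively groups the split parts into consecutive pairs, joins each pair with a comma separator and joins the groups with a semicolon separator.
import Mathlib
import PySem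

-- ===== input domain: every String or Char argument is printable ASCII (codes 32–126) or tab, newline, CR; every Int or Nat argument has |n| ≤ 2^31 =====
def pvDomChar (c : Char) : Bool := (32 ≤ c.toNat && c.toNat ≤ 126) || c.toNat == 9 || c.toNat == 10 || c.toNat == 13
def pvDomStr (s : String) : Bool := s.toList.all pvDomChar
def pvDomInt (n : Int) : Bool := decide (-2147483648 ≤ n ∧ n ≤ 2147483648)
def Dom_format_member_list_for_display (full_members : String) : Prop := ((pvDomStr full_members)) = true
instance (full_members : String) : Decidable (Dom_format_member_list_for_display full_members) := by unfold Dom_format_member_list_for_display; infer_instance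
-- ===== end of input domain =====

-- B replaces A's index-parity walk over enumerate(parts) by grouping the split parts
-- into consecutive pairs, joining each pair with a comma separator and the groups with
-- a semicolon separator (objective: simpler).

-- ===== PORT A =====
def format_member_list_for_display (full_members : String) : String :=
  if full_members = "" then ""
  else
    let parts := (PySem.Str.split? full_members ", ").getD []   -- sep ≠ "", so split? is `some`
    let new_members := (PySem.List.enumerate parts 0).foldl
      (fun acc p =>
        if p.1 > 0 then
          if PySem.Int.mod p.1 2 = 0 then acc ++ [PySem.Str.join "" ["; ", p.2]]
          else acc ++ [PySem.Str.join "" [", ", p.2]]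
        else acc ++ [p.2]) []
    PySem.Str.join "" new_members

-- ===== PORT B =====
-- port of Source B's `_pairs`: recursion on the parts list, grouping two at a time
def pvPairs : List String → List String
  | [] => [PySem.Str.join ", " []]
  | [a] => [PySem.Str.join ", " [a]]
  | [a, b] => [PySem.Str.join ", " [a, b]]
  | a :: b :: c :: rest => PySem.Str.join ", " [a, b] :: pvPairs (c :: rest)

def format_member_list_for_display_alt (full_members : String) : String :=
  if full_members = "" then ""
  else PySem.Str.join "; " (pvPairs ((PySem.Str.split? full_members ", ").getD []))

-- ===== PRECONDITION & SPEC =====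
def Spec_format_member_list_for_display (full_members : String) (out : String) : Prop := out = format_member_list_for_display_alt full_members
instance (full_members : String) (out : String) : Decidable (Spec_format_member_list_for_display full_members out) := by unfold Spec_format_member_list_for_display; infer_instance

-- ===== CLAIM (what is proved, stated in full; the proofs are below) =====
def Claim_equal_format_member_list_for_display : Prop := ∀ (full_members : String), Dom_format_member_list_for_display full_members → Spec_format_member_list_for_display full_members (format_member_list_for_display full_members)

-- ===== LEMMAS AND PROOFS =====

-- A's per-element result as a function of the enumerated pair
def pvFA (p : Int × String) : String :=
  if p.1 > 0 then
    if PySem.Int.mod p.1 2 = 0 then PySem.Str.join "" ["; ", p.2]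
    else PySem.Str.join "" [", ", p.2]
  else p.2

-- char-level alternating concatenation: flag true = next separator is ", "
def pvG : Bool → List (List Char) → List Char
  | _, [] => []
  | true, x :: xs => ", ".toList ++ x ++ pvG false xs
  | false, x :: xs => "; ".toList ++ x ++ pvG true xs

-- char-level mirror of pvPairs
def pvPairsC : List (List Char) → List (List Char)
  | [] => [[]]
  | [a] => [a]
  | [a, b] => [a ++ ", ".toList ++ b]
  | a :: b :: c :: rest => (a ++ ", ".toList ++ b) :: pvPairsC (c :: rest)

theorem pvPairs_toList : ∀ (l : List String),
    (pvPairs l).map String.toList = pvPairsC (l.map String.toList)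
  | [] => by
      simp [pvPairs, pvPairsC, PySem.Str.toList_join, PySem.Chars.join_nil]
  | [a] => by
      simp [pvPairs, pvPairsC, PySem.Str.toList_join, PySem.Chars.join_singleton]
  | [a, b] => by
      simp [pvPairs, pvPairsC, PySem.Str.toList_join, PySem.Chars.join_cons_cons,
        PySem.Chars.join_singleton]
  | a :: b :: c :: rest => by
      simp [pvPairs, pvPairsC, PySem.Str.toList_join, PySem.Chars.join_cons_cons,
        PySem.Chars.join_singleton, pvPairs_toList (c :: rest)]

theorem pvPairsC_ne_nil : ∀ (l : List (List Char)), pvPairsC l ≠ []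
  | [] => by simp [pvPairsC]
  | [a] => by simp [pvPairsC]
  | [a, b] => by simp [pvPairsC]
  | a :: b :: c :: rest => by simp [pvPairsC]

theorem pvJoin_cons_ne_nil (sep x : List Char) (L : List (List Char)) (h : L ≠ []) :
    PySem.Chars.join sep (x :: L) = x ++ sep ++ PySem.Chars.join sep L := by
  obtain ⟨q, rest, rfl⟩ := List.exists_cons_of_ne_nil h
  exact PySem.Chars.join_cons_cons sep x q rest

theorem pvJoin_empty : ∀ (L : List (List Char)), PySem.Chars.join [] L = L.flatten
  | [] => by simp [PySem.Chars.join_nil]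
  | [x] => by simp [PySem.Chars.join_singleton]
  | x :: y :: ys => by
      rw [PySem.Chars.join_cons_cons, pvJoin_empty (y :: ys)]; simp

-- E2: the alternating concatenation equals B's pair grouping
theorem pvE2 : ∀ (rest : List (List Char)) (a : List Char),
    a ++ pvG true rest = PySem.Chars.join "; ".toList (pvPairsC (a :: rest))
  | [], a => by simp [pvG, pvPairsC, PySem.Chars.join_singleton]
  | [b], a => by simp [pvG, pvPairsC, PySem.Chars.join_singleton]
  | b :: c :: rest', a => by
      rw [show pvPairsC (a :: b :: c :: rest') = (a ++ ", ".toList ++ b) :: pvPairsC (c :: rest')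
          from rfl,
        pvJoin_cons_ne_nil _ _ _ (pvPairsC_ne_nil _), ← pvE2 rest' c]
      simp [pvG]

-- E1: A's enumerated walk from a positive index is the alternating concatenation
theorem pvE1 : ∀ (rest : List String) (i : Int), 1 ≤ i →
    ((PySem.List.enumerate rest i).map (fun p => (pvFA p).toList)).flatten
      = pvG (PySem.Int.mod i 2 == 1) (rest.map String.toList) := by
  intro rest
  induction rest with
  | nil => intro i _; simp [PySem.List.enumerate_nil, pvG]
  | cons x xs ih =>
    intro i hi
    rw [PySem.List.enumerate_cons, List.map_cons, List.flatten_cons,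
      ih (i + 1) (by omega), List.map_cons]
    have h2 : PySem.Int.mod i 2 = i % 2 := PySem.Int.mod_eq_emod_of_pos (by norm_num)
    have h2' : PySem.Int.mod (i + 1) 2 = (i + 1) % 2 :=
      PySem.Int.mod_eq_emod_of_pos (by norm_num)
    rcases Int.emod_two_eq_zero_or_one i with h | h
    · have hfa : pvFA (i, x) = PySem.Str.join "" ["; ", x] := by
        unfold pvFA
        rw [if_pos (show (i, x).1 > 0 by omega), if_pos (by rw [h2]; exact h)]
      have hodd : (i + 1) % 2 = 1 := by omega
      rw [hfa, h2, h, h2', hodd]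
      simp [pvG, PySem.Str.toList_join, PySem.Chars.join_cons_cons,
        PySem.Chars.join_singleton]
    · have hfa : pvFA (i, x) = PySem.Str.join "" [", ", x] := by
        unfold pvFA
        rw [if_pos (show (i, x).1 > 0 by omega), if_neg (by rw [h2, h]; norm_num)]
      have heven : (i + 1) % 2 = 0 := by omega
      rw [hfa, h2, h, h2', heven]
      simp [pvG, PySem.Str.toList_join, PySem.Chars.join_cons_cons,
        PySem.Chars.join_singleton]

theorem pvMain (parts : List String) :
    PySem.Str.join "" ((PySem.List.enumerate parts 0).foldl
      (fun acc p =>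
        if p.1 > 0 then
          if PySem.Int.mod p.1 2 = 0 then acc ++ [PySem.Str.join "" ["; ", p.2]]
          else acc ++ [PySem.Str.join "" [", ", p.2]]
        else acc ++ [p.2]) [])
      = PySem.Str.join "; " (pvPairs parts) := by
  have hbody : (fun (acc : List String) (p : Int × String) =>
        if p.1 > 0 then
          if PySem.Int.mod p.1 2 = 0 then acc ++ [PySem.Str.join "" ["; ", p.2]]
          else acc ++ [PySem.Str.join "" [", ", p.2]]
        else acc ++ [p.2])
      = fun acc p => acc ++ [pvFA p] := by
    funext acc p; unfold pvFA; split_ifs <;> rfl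
  rw [hbody, PySem.List.foldl_append_singleton_eq_map, List.nil_append]
  unfold PySem.Str.join
  apply congrArg String.ofList
  rw [pvPairs_toList, show ("".toList : List Char) = [] from rfl, pvJoin_empty,
    List.map_map]
  cases parts with
  | nil => simp [PySem.List.enumerate_nil, pvPairsC, PySem.Chars.join_singleton]
  | cons a rest =>
    rw [PySem.List.enumerate_cons, List.map_cons, List.flatten_cons]
    simp only [zero_add]
    rw [show (String.toList ∘ pvFA) = (fun p => (pvFA p).toList) from rfl,
      pvE1 rest 1 (le_refl 1),
      show (PySem.Int.mod 1 2 == 1) = true from by decide]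
    beta_reduce
    rw [show (pvFA ((0 : Int), a)).toList = a.toList from by simp [pvFA],
      List.map_cons]
    exact pvE2 (rest.map String.toList) a.toList

-- ===== VERDICT (by name: the statement is the Claim_ definition above) =====
theorem format_member_list_for_display_spec : Claim_equal_format_member_list_for_display := by
  intro s _
  unfold Spec_format_member_list_for_display format_member_list_for_display
    format_member_list_for_display_alt
  by_cases h : s = ""
  · simp [h]
  · simp only [h, reduceIte]
    exact pvMain _
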